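-- pv_equiv track=rewrite | github.com/MrBrantCode/unitest_baseline | mut_generate/mist_train_taco/taco_10417/solution.py | process_cyclic_shifts
-- ===== SOURCE A (Python) =====
-- def process_cyclic_shifts(s: str, queries: list) -> str:
--     """
--     Process a series of cyclic shift queries on a given string.
--
--     Parameters:
--     - s (str): The initial string.
--     - queries (list): A list of tuples where each tuple contains three integers (l, r, k).
--                       Each tuple represents a query to cyclically shift the substring s[l...r] k times.
--                       Indices l and r are 1-based.
--
--     Returns:
--     - str: The resulting string after processing all queries.
--     """
--
--     class ShiftCommand:
--         def __init__(self, left, right, shift_step):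
--             self.left = left
--             self.right = right
--             self.shift_range = self.right - self.left
--             self.shift_step = self._remove_circles(shift_step)
--
--         def _remove_circles(self, shift_step):
--             return shift_step % self.shift_range
--
--         def apply_command(self, characters):
--             buff = characters[self.left:self.right]
--             for i in range(self.left, self.right):
--                 characters[i] = buff[(i - self.left - self.shift_step) % self.shift_range]
--             return characters
--
--     characters = list(s)
--     for query in queries:
--         l, r, k = query
--         command = ShiftCommand(l - 1, r, k)
--         characters = command.apply_command(characters)
--
--     return ''.join(characters)
-- ===== SOURCE B (Python) =====
-- def process_cyclic_shifts(s: str, queries: list) -> str: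
--     chars = list(s)
--     for l, r, k in queries:
--         left = l - 1
--         length = r - left
--         shift = k % length  # ZeroDivisionError when r == l - 1, exactly as A
--         sub = chars[left:r]
--         chars[left:r] = sub[-shift:] + sub[:-shift]
--     return ''.join(chars)
-- ===== Notes on version B (the rewrite author's own statement) =====
-- stated objective: simpler
-- what changed: Replaces A's ShiftCommand class with its per-index write loop (characters[i] = buff[(i-left-shift)%range]) by a direct slice rotation: sub = chars[l-1:r]; chars[l-1:r] = sub[-shift:] + sub[:-shift].
-- outside the precondition, e.g. on process_cyclic_shifts('abcde', [(2, -1, 1)]): A returns 'abcde', B returns 'acdbe'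
import Mathlib
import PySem

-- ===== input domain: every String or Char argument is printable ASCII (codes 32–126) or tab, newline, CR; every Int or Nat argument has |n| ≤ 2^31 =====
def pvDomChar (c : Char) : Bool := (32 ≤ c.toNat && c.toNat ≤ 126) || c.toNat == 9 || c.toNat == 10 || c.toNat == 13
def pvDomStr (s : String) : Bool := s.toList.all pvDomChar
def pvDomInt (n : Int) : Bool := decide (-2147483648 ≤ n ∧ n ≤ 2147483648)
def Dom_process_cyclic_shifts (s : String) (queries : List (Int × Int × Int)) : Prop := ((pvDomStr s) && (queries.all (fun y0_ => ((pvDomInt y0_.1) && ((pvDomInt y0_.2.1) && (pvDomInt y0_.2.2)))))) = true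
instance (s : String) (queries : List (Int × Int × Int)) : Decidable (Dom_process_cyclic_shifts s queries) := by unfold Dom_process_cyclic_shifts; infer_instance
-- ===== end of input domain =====

-- B replaces A's per-index modulo-formula write loop (inside a ShiftCommand class) by a
-- slice rotation with slice assignment; same cost, plainer (objective: simpler).

-- ===== PORT A =====
-- ShiftCommand.apply_command: buff = characters[left:right];
-- for i in range(left, right): characters[i] = buff[(i - left - shift_step) % shift_range]
def pvApplyCommandA (left right shift_range shift_step : Int) (characters : List Char) : List Char :=
  let buff := PySem.List.slice characters (some left) (some right)
  (PySem.List.pyRange left right 1).foldl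
    (fun cs i => PySem.List.pySetD cs i
      (PySem.List.pyGetD buff (PySem.Int.mod (i - left - shift_step) shift_range) ' '))
    characters

def process_cyclic_shifts (s : String) (queries : List (Int × Int × Int)) : String :=
  let characters := s.toList
  let characters := queries.foldl (fun cs q =>
    let left := q.1 - 1
    let right := q.2.1
    let shift_range := right - left
    -- shift_step % shift_range: Python raises ZeroDivisionError iff shift_range = 0 (excluded by Pre_)
    let shift_step := PySem.Int.mod q.2.2 shift_range
    pvApplyCommandA left right shift_range shift_step cs) characters
  String.ofList characters

-- ===== PORT B =====
-- Python step-1 slice assignment chars[start:stop] = v, ported by hand: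
-- result = chars[:start'] + v + chars[max(start', stop'):] with start', stop' the clamped
-- slice indices (exact for step-1 slice assignment).
def pvSpliceB (chars : List Char) (start stop : Int) (v : List Char) : List Char :=
  let a := PySem.List.clampIdx chars.length start
  let b := max a (PySem.List.clampIdx chars.length stop)
  chars.take a ++ v ++ chars.drop b

def pvStepB (chars : List Char) (q : Int × Int × Int) : List Char :=
  let left := q.1 - 1
  let length := q.2.1 - left
  -- k % length: Python raises ZeroDivisionError iff length = 0 (excluded by Pre_)
  let shift := PySem.Int.mod q.2.2 length
  let sub := PySem.List.slice chars (some left) (some q.2.1)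
  pvSpliceB chars left q.2.1
    (PySem.List.slice sub (some (-shift)) none ++ PySem.List.slice sub none (some (-shift)))

def process_cyclic_shifts_alt (s : String) (queries : List (Int × Int × Int)) : String :=
  String.ofList (queries.foldl pvStepB s.toList)

-- ===== PRECONDITION & SPEC =====
-- Pre_ excludes queries with r = l-1 (A raises ZeroDivisionError), active (l <= r) queries
-- whose bounds leave the string (l < 1 or r > len(s): A raises IndexError), and reversed-range
-- queries that mix negative wraparound bounds, where neither behaviour is specified (A's empty
-- loop leaves the string unchanged, B's slice assignment follows Python's slice wraparound).
def Pre_process_cyclic_shifts (s : String) (queries : List (Int × Int × Int)) : Prop :=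
  ∀ q ∈ queries, q.2.1 ≠ q.1 - 1 ∧
    (q.1 ≤ q.2.1 → 1 ≤ q.1 ∧ q.2.1 ≤ (s.toList.length : Int)) ∧
    (q.2.1 < q.1 →
      PySem.List.clampIdx s.toList.length q.2.1 ≤ PySem.List.clampIdx s.toList.length (q.1 - 1)
        ∨ q.2.1 = q.1 - 2)
instance (s : String) (queries : List (Int × Int × Int)) : Decidable (Pre_process_cyclic_shifts s queries) := by unfold Pre_process_cyclic_shifts; infer_instance

def pvWitness_process_cyclic_shifts : String × (List (Int × Int × Int)) := ("abcde", [(2, 4, 1), (1, 5, 7)])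

def Spec_process_cyclic_shifts (s : String) (queries : List (Int × Int × Int)) (out : String) : Prop := out = process_cyclic_shifts_alt s queries
instance (s : String) (queries : List (Int × Int × Int)) (out : String) : Decidable (Spec_process_cyclic_shifts s queries out) := by unfold Spec_process_cyclic_shifts; infer_instance

-- ===== CLAIM (what is proved, stated in full; the proofs are below) =====
def Claim_equal_process_cyclic_shifts : Prop := ∀ (s : String) (queries : List (Int × Int × Int)), Dom_process_cyclic_shifts s queries → Pre_process_cyclic_shifts s queries → Spec_process_cyclic_shifts s queries (process_cyclic_shifts s queries)

-- ===== LEMMAS AND PROOFS =====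

lemma pv_foldl_length (f : List Char → Int → List Char)
    (hf : ∀ cs i, (f cs i).length = cs.length) :
    ∀ (xs : List Int) (cs : List Char), (xs.foldl f cs).length = cs.length := by
  intro xs
  induction xs with
  | nil => intro cs; rfl
  | cons x xs ih => intro cs; simp only [List.foldl_cons]; rw [ih, hf]

lemma pv_stepA_length (left right shift_range shift_step : Int) (chars : List Char) :
    (pvApplyCommandA left right shift_range shift_step chars).length = chars.length := by
  simp only [pvApplyCommandA]
  exact pv_foldl_length _ (fun cs i => PySem.List.length_pySetD ..) _ _

-- slicing an empty list always gives []
lemma pv_slice_nil (a b : Option Int) : PySem.List.slice ([] : List Char) a b = [] := by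
  apply List.eq_nil_iff_forall_not_mem.mpr
  intro x hx
  have hmem : x ∈ ([] : List Char) := PySem.List.mem_of_mem_slice _ _ _ hx
  simp at hmem

-- A's write loop writes each index once: it splices the mapped values into the list.
lemma pv_foldl_set_eq_splice (f : Int → Char) (a b : Int) (cs : List Char)
    (ha : 0 ≤ a) (hab : a ≤ b) (hb : b ≤ (cs.length : Int)) :
    (PySem.List.pyRange a b 1).foldl (fun cs i => PySem.List.pySetD cs i (f i)) cs
      = cs.take a.toNat ++ (PySem.List.pyRange a b 1).map f ++ cs.drop b.toNat := by
  generalize hn : (b - a).toNat = n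
  induction n generalizing a cs with
  | zero =>
    have hba : a = b := by omega
    subst hba
    rw [PySem.List.pyRange_one]
    have h0 : (a - a).toNat = 0 := by omega
    rw [h0]
    simp
  | succ n ih =>
    have hlt : a < b := by omega
    have hatn : a.toNat < cs.length := by omega
    rw [PySem.List.pyRange_one_cons hlt]
    simp only [List.foldl_cons, List.map_cons]
    rw [PySem.List.pySetD_of_nonneg _ _ ha]
    rw [ih (a + 1) (cs.set a.toNat (f a)) (by omega) (by omega) (by simpa using hb) (by omega)]
    have h1 : (cs.set a.toNat (f a)).take (a + 1).toNat = cs.take a.toNat ++ [f a] := by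
      have he : (a + 1).toNat = a.toNat + 1 := by omega
      rw [he, List.take_add_one, List.take_set_of_le (le_refl _), List.getElem?_set_self hatn]
      rfl
    have h2 : (cs.set a.toNat (f a)).drop b.toNat = cs.drop b.toNat :=
      List.drop_set_of_lt (by omega)
    rw [h1, h2]
    simp

-- splicing a slice back between its own clamped bounds reconstructs the list
lemma pv_splice_slice_id (xs : List Char) (a b : Int) :
    xs.take (PySem.List.clampIdx xs.length a) ++ PySem.List.slice xs (some a) (some b)
      ++ xs.drop (max (PySem.List.clampIdx xs.length a) (PySem.List.clampIdx xs.length b)) = xs := by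
  have hsl : PySem.List.slice xs (some a) (some b)
      = (xs.drop (PySem.List.clampIdx xs.length a)).take
          (PySem.List.clampIdx xs.length b - PySem.List.clampIdx xs.length a) := rfl
  set ac := PySem.List.clampIdx xs.length a with hac
  set bc := PySem.List.clampIdx xs.length b with hbc
  by_cases h : ac ≤ bc
  · rw [hsl, max_eq_right h, ← List.take_add, (by omega : ac + (bc - ac) = bc),
      List.take_append_drop]
  · rw [hsl, max_eq_left (by omega), (by omega : bc - ac = 0)]
    simp

-- per-query agreement
lemma pv_step_eq (chars : List Char) (q : Int × Int × Int)
    (h3 : q.2.1 ≠ q.1 - 1)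
    (hA : q.1 ≤ q.2.1 → 1 ≤ q.1 ∧ q.2.1 ≤ (chars.length : Int))
    (hB : q.2.1 < q.1 →
      PySem.List.clampIdx chars.length q.2.1 ≤ PySem.List.clampIdx chars.length (q.1 - 1)
        ∨ q.2.1 = q.1 - 2) :
    pvApplyCommandA (q.1 - 1) q.2.1 (q.2.1 - (q.1 - 1)) (PySem.Int.mod q.2.2 (q.2.1 - (q.1 - 1))) chars
      = pvStepB chars q := by
  obtain ⟨l, rr⟩ := q
  obtain ⟨r, k⟩ := rr
  simp only [] at h3 hA hB ⊢
  by_cases hcase : l ≤ r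
  · -- active query: 0 ≤ left < r ≤ len
    obtain ⟨h1, hrn⟩ := hA hcase
    obtain ⟨leftN, hleftN⟩ : ∃ m : Nat, l - 1 = (m : Int) := ⟨(l - 1).toNat, (Int.toNat_of_nonneg (by omega)).symm⟩
    obtain ⟨rN, hrN⟩ : ∃ m : Nat, r = (m : Int) := ⟨r.toNat, (Int.toNat_of_nonneg (by omega)).symm⟩
    have hlr : leftN < rN := by omega
    have hrle : rN ≤ chars.length := by omega
    unfold pvApplyCommandA pvStepB pvSpliceB
    simp only []
    rw [hleftN, hrN]
    set shift := PySem.Int.mod k ((rN : Int) - (leftN : Int)) with hshiftdef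
    have hLpos : (0 : Int) < (rN : Int) - (leftN : Int) := by omega
    have hs0 : 0 ≤ shift := PySem.Int.mod_nonneg _ hLpos
    have hsL : shift < (rN : Int) - (leftN : Int) := PySem.Int.mod_lt _ hLpos
    set sub := PySem.List.slice chars (some ((leftN : Int))) (some ((rN : Int))) with hsubdef
    have hsubLen : sub.length = rN - leftN := by
      rw [hsubdef, PySem.List.slice_natCast]
      simp
      omega
    rw [pv_foldl_set_eq_splice
      (fun i => PySem.List.pyGetD sub (PySem.Int.mod (i - (leftN : Int) - shift) ((rN : Int) - (leftN : Int))) ' ')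
      (leftN : Int) (rN : Int) chars (by omega) (by omega) (by omega)]
    rw [PySem.List.clampIdx_natCast, PySem.List.clampIdx_natCast]
    rw [min_eq_left (by omega), min_eq_left (by omega), max_eq_right (by omega),
      Int.toNat_natCast, Int.toNat_natCast]
    congr 1
    congr 1
    have hlen : (PySem.List.pyRange ((leftN : Int)) ((rN : Int)) 1).length = rN - leftN := by
      rw [PySem.List.length_pyRange_one]
      omega
    by_cases hzero : shift = 0
    · -- no rotation: sub[-0:] = sub, sub[:-0] = []
      rw [hzero, neg_zero]
      rw [PySem.List.slice_from _ (le_refl 0), PySem.List.slice_to _ (le_refl 0)]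
      simp only [Int.toNat_zero, List.drop_zero, List.take_zero, List.append_nil]
      apply List.ext_getElem
      · simp [hlen, hsubLen]
      · intro j hj1 hj2
        have hj : j < rN - leftN := by simpa [hlen] using hj1
        simp only [List.getElem_map, PySem.List.getElem_pyRange_one]
        have harg : (leftN : Int) + (j : Int) - (leftN : Int) - 0 = (j : Int) := by ring
        rw [harg, PySem.Int.mod_eq_emod_of_pos hLpos]
        have hemod : (j : Int) % ((rN : Int) - (leftN : Int)) = (j : Int) :=
          Int.emod_eq_of_lt (by omega) (by omega)
        rw [hemod]
        rw [PySem.List.pyGetD_eq_getElem _ _ (by omega) (by rw [hsubLen]; omega)]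
        congr 1 <;> omega
    · -- proper rotation by shift ∈ (0, L)
      have hspos : 0 < shift := lt_of_le_of_ne hs0 (Ne.symm hzero)
      obtain ⟨sN, hsN⟩ : ∃ m : Nat, shift = (m : Int) := ⟨shift.toNat, (Int.toNat_of_nonneg hs0).symm⟩
      have hsNpos : 0 < sN := by omega
      have hsNlt : sN < rN - leftN := by omega
      rw [hsN, PySem.List.slice_from_neg_natCast _ _ hsNpos, PySem.List.slice_to_neg_natCast _ _ hsNpos]
      apply List.ext_getElem
      · simp [hlen, hsubLen]
      · intro j hj1 hj2
        have hj : j < rN - leftN := by simpa [hlen] using hj1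
        simp only [List.getElem_map, PySem.List.getElem_pyRange_one]
        have harg : (leftN : Int) + (j : Int) - (leftN : Int) - (sN : Int) = (j : Int) - (sN : Int) := by ring
        rw [harg, PySem.Int.mod_eq_emod_of_pos hLpos]
        have hdropLen : (sub.drop (sub.length - sN)).length = sN := by
          simp [hsubLen]
          omega
        by_cases hjs : j < sN
        · -- wrapped part: index j - shift + L
          have hemod : ((j : Int) - (sN : Int)) % ((rN : Int) - (leftN : Int))
              = (j : Int) - (sN : Int) + ((rN : Int) - (leftN : Int)) := by
            have h5 : ((j : Int) - (sN : Int) + ((rN : Int) - (leftN : Int))) % ((rN : Int) - (leftN : Int))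
                = ((j : Int) - (sN : Int)) % ((rN : Int) - (leftN : Int)) := Int.add_emod_right _ _
            rw [← h5]
            exact Int.emod_eq_of_lt (by omega) (by omega)
          rw [hemod]
          rw [PySem.List.pyGetD_eq_getElem _ _ (by omega) (by rw [hsubLen]; omega)]
          rw [List.getElem_append_left (by omega)]
          rw [List.getElem_drop]
          congr 1 <;> omega
        · -- unwrapped part: index j - shift
          have hemod : ((j : Int) - (sN : Int)) % ((rN : Int) - (leftN : Int)) = (j : Int) - (sN : Int) :=
            Int.emod_eq_of_lt (by omega) (by omega)
          rw [hemod]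
          rw [PySem.List.pyGetD_eq_getElem _ _ (by omega) (by rw [hsubLen]; omega)]
          rw [List.getElem_append_right (by omega)]
          rw [List.getElem_take]
          congr 1 <;> (try simp only [List.length_drop]) <;> omega
  · -- reversed query r ≤ l - 2: A's loop is empty and B is a no-op too
    have hrl2 : r ≤ l - 2 := by omega
    obtain hemp | hl2 := hB (by omega)
    all_goals
      unfold pvApplyCommandA pvStepB pvSpliceB
      simp only []
      rw [PySem.List.pyRange_one]
      rw [(by omega : (r - (l - 1)).toNat = 0)]
      simp only [List.range_zero, List.map_nil, List.foldl_nil]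
    · -- the slice chars[l-1:r] is empty, so B splices nothing back in place
      have hsub : PySem.List.slice chars (some (l - 1)) (some r) = [] := by
        apply List.eq_nil_of_length_eq_zero
        rw [PySem.List.length_slice]
        omega
      rw [hsub, pv_slice_nil, pv_slice_nil]
      rw [max_eq_left hemp]
      simp
    · -- r = l - 2: shift = k % (-1) = 0, and B puts the slice back unchanged
      rw [(by omega : r - (l - 1) = -1)]
      have hm0 : PySem.Int.mod k (-1) = 0 := by
        obtain ⟨hu, hv⟩ := PySem.Int.mod_neg_bounds (a := k) (b := -1) (by norm_num)
        omega
      rw [hm0, neg_zero]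
      rw [PySem.List.slice_from _ (le_refl 0), PySem.List.slice_to _ (le_refl 0)]
      simp only [Int.toNat_zero, List.drop_zero, List.take_zero, List.append_nil]
      exact (pv_splice_slice_id chars (l - 1) r).symm

-- ===== VERDICT (by name: the statement is the Claim_ definition above) =====
theorem process_cyclic_shifts_spec : Claim_equal_process_cyclic_shifts := by
  intro s queries _ hpre
  unfold Spec_process_cyclic_shifts process_cyclic_shifts process_cyclic_shifts_alt
  simp only []
  congr 1
  have main : ∀ (qs : List (Int × Int × Int)) (cs : List Char),
      (∀ q ∈ qs, q.2.1 ≠ q.1 - 1 ∧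
        (q.1 ≤ q.2.1 → 1 ≤ q.1 ∧ q.2.1 ≤ (cs.length : Int)) ∧
        (q.2.1 < q.1 →
          PySem.List.clampIdx cs.length q.2.1 ≤ PySem.List.clampIdx cs.length (q.1 - 1)
            ∨ q.2.1 = q.1 - 2)) →
      qs.foldl (fun cs q =>
        pvApplyCommandA (q.1 - 1) q.2.1 (q.2.1 - (q.1 - 1)) (PySem.Int.mod q.2.2 (q.2.1 - (q.1 - 1))) cs) cs
        = qs.foldl pvStepB cs := by
    intro qs
    induction qs with
    | nil => intro cs _; rfl
    | cons q qs ih =>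
      intro cs hq
      obtain ⟨h3, hA, hB⟩ := hq q (List.mem_cons_self ..)
      have hstep := pv_step_eq cs q h3 hA hB
      simp only [List.foldl_cons]
      rw [hstep, ih]
      intro q' hq'
      obtain ⟨g1, g2, g3⟩ := hq q' (List.mem_cons_of_mem _ hq')
      rw [← hstep, pv_stepA_length]
      exact ⟨g1, g2, g3⟩
  exact main queries s.toList hpre
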